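-- pv_equiv track=rewrite | github.com/SozBroz/PPO_v_AW | scripts/start_solo_training.py | _last_int_for_flag
-- ===== SOURCE A (Python) =====
-- def _last_int_for_flag(argv: list[str], flag: str) -> int | None:
--     last: int | None = None
--     for i, tok in enumerate(argv):
--         if tok == flag and i + 1 < len(argv):
--             try:
--                 last = int(argv[i + 1], 0)
--             except ValueError:
--                 pass
--     return last
-- ===== SOURCE B (Python) =====
-- def _last_int_for_flag(argv: list[str], flag: str) -> int | None:
--     for i in range(len(argv) - 2, -1, -1):
--         if argv[i] == flag:
--             try:
--                 return int(argv[i + 1], 0)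
--             except ValueError:
--                 pass
--     return None
-- ===== Notes on version B (the rewrite author's own statement) =====
-- stated objective: simpler
-- what changed: B scans argv backwards and returns the first successful base-0 int parse after the flag (= the last forward one), instead of A's forward pass that keeps overwriting an accumulator.
import Mathlib
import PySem

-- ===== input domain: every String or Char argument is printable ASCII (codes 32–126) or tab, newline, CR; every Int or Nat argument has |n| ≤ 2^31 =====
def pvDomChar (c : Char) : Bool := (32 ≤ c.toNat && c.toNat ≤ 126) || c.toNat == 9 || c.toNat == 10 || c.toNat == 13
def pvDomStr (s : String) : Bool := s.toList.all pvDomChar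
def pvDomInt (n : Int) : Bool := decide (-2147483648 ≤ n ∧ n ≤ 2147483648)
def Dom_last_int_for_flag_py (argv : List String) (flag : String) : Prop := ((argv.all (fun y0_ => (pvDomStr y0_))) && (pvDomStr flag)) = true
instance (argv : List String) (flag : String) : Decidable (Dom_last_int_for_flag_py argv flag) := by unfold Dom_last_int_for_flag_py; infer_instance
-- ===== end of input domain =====

-- B replaces A's forward accumulate-and-overwrite pass by a backward scan that returns the
-- first successful base-0 int parse after the flag; return value only, no side effects (objective: simpler).

-- ===== PORT A =====
-- for i, tok in enumerate(argv): if tok == flag and i+1 < len(argv): try: last = int(argv[i+1], 0) except ValueError: pass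
def last_int_for_flag_py (argv : List String) (flag : String) : Option Int :=
  (PySem.List.enumerate argv 0).foldl
    (fun last p =>
      if p.2 == flag && decide (p.1 + 1 < (argv.length : Int)) then
        -- argv[i+1]: the guard puts i+1 in range, so pyGetD is exact here
        match PySem.Int.ofStrBase? (PySem.List.pyGetD argv (p.1 + 1) "") 0 with
        | some v => some v
        | none => last
      else last)
    none

-- ===== PORT B =====
-- for i in range(len(argv)-2, -1, -1): if argv[i] == flag: try: return int(argv[i+1], 0) except ValueError: pass
-- recursion counts down: altLoop (j+1) examines index j; indices are in range, so getD is exact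
def altLoop (argv : List String) (flag : String) : Nat → Option Int
  | 0 => none
  | j + 1 =>
    if argv.getD j "" == flag then
      match PySem.Int.ofStrBase? (argv.getD (j + 1) "") 0 with
      | some v => some v
      | none => altLoop argv flag j
    else altLoop argv flag j

def last_int_for_flag_py_alt (argv : List String) (flag : String) : Option Int :=
  altLoop argv flag (argv.length - 1)

-- ===== PRECONDITION & SPEC =====
def Spec_last_int_for_flag_py (argv : List String) (flag : String) (out : Option Int) : Prop := out = last_int_for_flag_py_alt argv flag
instance (argv : List String) (flag : String) (out : Option Int) : Decidable (Spec_last_int_for_flag_py argv flag out) := by unfold Spec_last_int_for_flag_py; infer_instance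

-- ===== CLAIM (what is proved, stated in full; the proofs are below) =====
def Claim_equal_last_int_for_flag_py : Prop := ∀ (argv : List String) (flag : String), Dom_last_int_for_flag_py argv flag → Spec_last_int_for_flag_py argv flag (last_int_for_flag_py argv flag)

-- ===== LEMMAS AND PROOFS =====

-- A's step function, specialised to a natural index k (tok = argv[k])
def aStep (argv : List String) (flag : String) (last : Option Int) (k : Nat) : Option Int :=
  if argv.getD k "" == flag && decide ((k : Int) + 1 < (argv.length : Int)) then
    match PySem.Int.ofStrBase? (PySem.List.pyGetD argv ((k : Int) + 1) "") 0 with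
    | some v => some v
    | none => last
  else last

lemma afold_eq_altLoop (argv : List String) (flag : String) :
    ∀ m, m ≤ argv.length - 1 →
      (List.range m).foldl (aStep argv flag) none = altLoop argv flag m := by
  intro m
  induction m with
  | zero => intro _; simp [altLoop]
  | succ j ih =>
    intro hm
    have hj : j ≤ argv.length - 1 := Nat.le_of_succ_le hm
    have hlt : (j : Int) + 1 < (argv.length : Int) := by omega
    rw [List.range_succ, List.foldl_append, List.foldl_cons, List.foldl_nil, ih hj]
    have hget : PySem.List.pyGetD argv ((j : Int) + 1) "" = argv.getD (j + 1) "" := by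
      have := PySem.List.pyGetD_natCast argv (j + 1) ""
      simpa using this
    simp only [aStep, hlt, decide_true, Bool.and_true, altLoop, hget]

lemma a_eq_fold_range (argv : List String) (flag : String) :
    last_int_for_flag_py argv flag =
      (List.range argv.length).foldl (aStep argv flag) none := by
  unfold last_int_for_flag_py
  rw [show PySem.List.enumerate argv 0
        = List.map (fun j => (j, PySem.List.pyGetD argv j "")) (PySem.List.pyRange 0 (PySem.List.len argv) 1)
      from PySem.List.enumerate_eq_map_pyRange argv ""]
  rw [PySem.List.pyRange_one, List.map_map, List.foldl_map]
  have hlen : ((PySem.List.len argv : Int) - 0).toNat = argv.length := by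
    simp [PySem.List.len]
  rw [hlen]
  congr 1
  funext last k
  simp [aStep, PySem.List.pyGetD_natCast]

-- ===== VERDICT (by name: the statement is the Claim_ definition above) =====
theorem last_int_for_flag_py_spec : Claim_equal_last_int_for_flag_py := by
  intro argv flag _
  show last_int_for_flag_py argv flag = last_int_for_flag_py_alt argv flag
  rw [a_eq_fold_range]
  unfold last_int_for_flag_py_alt
  cases h : argv.length with
  | zero => simp [altLoop]
  | succ m =>
    have hlt : ¬ ((m : Int) + 1 < (argv.length : Int)) := by rw [h]; push_cast; omega
    have hstep : ∀ x, aStep argv flag x m = x := by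
      intro x; simp [aStep, hlt]
    rw [List.range_succ, List.foldl_append, List.foldl_cons, List.foldl_nil, hstep,
        afold_eq_altLoop argv flag m (by omega)]
    simp
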